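-- pv_equiv track=rewrite | github.com/inusarukiji/AI_Conference | NeurIPS/neurips_2023-.py | choose_best_decision
-- ===== SOURCE A (Python) =====
-- def choose_best_decision(decision_list):
--     if not decision_list:
--         return None
--
--     priority_keywords = [
--         "oral",
--         "spotlight",
--         "poster",
--         "accept",
--         "reject"
--     ]
--
--     for key in priority_keywords:
--         for d in decision_list:
--             if d and key in d.lower():
--                 return d
--
--     return decision_list[0]
-- ===== SOURCE B (Python) =====
-- def choose_best_decision(decision_list):
--     if not decision_list:
--         return None
--
--     keywords = ["oral", "spotlight", "poster", "accept", "reject"]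
--
--     best = None
--     best_rank = len(keywords)
--     for d in decision_list:
--         if not d:
--             continue
--         low = d.lower()
--         rank = next((i for i, k in enumerate(keywords) if k in low), None)
--         if rank is not None and rank < best_rank:
--             best_rank = rank
--             best = d
--
--     return best if best is not None else decision_list[0]
-- ===== Notes on version B (the rewrite author's own statement) =====
-- stated objective: alternative
-- what changed: Replaced A's keyword-major nested scan with early return (for each of the 5 keywords, rescan the whole list) by a single pass over the list that computes each element's keyword rank once and keeps the first element achieving a strictly smaller rank.
import Mathlib
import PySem

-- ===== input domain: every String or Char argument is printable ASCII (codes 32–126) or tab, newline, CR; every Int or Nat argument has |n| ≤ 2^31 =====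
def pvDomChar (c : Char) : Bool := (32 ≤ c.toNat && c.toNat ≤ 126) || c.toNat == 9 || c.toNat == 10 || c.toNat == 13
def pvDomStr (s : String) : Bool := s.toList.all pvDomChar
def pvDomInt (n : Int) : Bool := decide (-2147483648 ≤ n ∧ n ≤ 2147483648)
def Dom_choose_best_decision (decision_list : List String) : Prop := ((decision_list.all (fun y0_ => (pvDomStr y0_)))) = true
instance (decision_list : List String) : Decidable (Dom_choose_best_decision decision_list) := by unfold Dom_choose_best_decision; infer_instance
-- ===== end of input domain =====

-- B replaces A's keyword-major rescans by a single pass that ranks each element once; return values proved equal.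

-- ===== PORT A =====
-- inner loop: 'for d in decision_list: if d and key in d.lower(): return d'
def pvFindKey (key : String) : List String → Option String
  | [] => none
  | d :: rest =>
    if decide (d ≠ "") && PySem.Str.isIn key (PySem.Str.lower d) then some d
    else pvFindKey key rest

-- outer loop over priority_keywords with early return
def pvScanKeys (decision_list : List String) : List String → Option String
  | [] => none
  | key :: keys =>
    match pvFindKey key decision_list with
    | some d => some d
    | none => pvScanKeys decision_list keys

def choose_best_decision (decision_list : List String) : Option String :=
  if decision_list = [] then none
  else
    match pvScanKeys decision_list ["oral", "spotlight", "poster", "accept", "reject"] with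
    | some d => some d
    | none => PySem.List.pyGet? decision_list 0

-- ===== PORT B =====
-- 'next((i for i, k in enumerate(keywords) if k in low), None)'
def pvRankOf (low : String) : List String → Nat → Option Nat
  | [], _ => none
  | k :: ks, i => if PySem.Str.isIn k low then some i else pvRankOf low ks (i + 1)

-- one iteration of B's single loop: state = (best_rank, best)
def pvBStep (s : Nat × Option String) (d : String) : Nat × Option String :=
  if d = "" then s
  else
    match pvRankOf (PySem.Str.lower d) ["oral", "spotlight", "poster", "accept", "reject"] 0 with
    | none => s
    | some i => if i < s.1 then (i, some d) else s

def choose_best_decision_alt (decision_list : List String) : Option String :=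
  if decision_list = [] then none
  else
    match (decision_list.foldl pvBStep (5, none)).2 with
    | some d => some d
    | none => PySem.List.pyGet? decision_list 0

-- ===== PRECONDITION & SPEC =====
def Spec_choose_best_decision (decision_list : List String) (out : Option String) : Prop := out = choose_best_decision_alt decision_list
instance (decision_list : List String) (out : Option String) : Decidable (Spec_choose_best_decision decision_list out) := by unfold Spec_choose_best_decision; infer_instance

-- ===== CLAIM (what is proved, stated in full; the proofs are below) =====
def Claim_equal_choose_best_decision : Prop := ∀ (decision_list : List String), Dom_choose_best_decision decision_list → Spec_choose_best_decision decision_list (choose_best_decision decision_list)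

-- ===== LEMMAS AND PROOFS =====

-- d matches keyword k (A's test 'd and key in d.lower()')
def pvMkw (k d : String) : Bool := decide (d ≠ "") && PySem.Str.isIn k (PySem.Str.lower d)

-- rank of d relative to keyword list ks (ks.length if no keyword matches)
def pvRk (ks : List String) (d : String) : Nat :=
  match ks with
  | [] => 0
  | k :: ks' => if pvMkw k d then 0 else pvRk ks' d + 1

-- best (smallest) rank over the list, ks.length if nothing matches
def pvBp (ks : List String) (l : List String) : Nat :=
  l.foldr (fun d r => min (pvRk ks d) r) ks.length

theorem pvFindKey_eq (k : String) (l : List String) :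
    pvFindKey k l = l.find? (fun d => pvMkw k d) := by
  induction l with
  | nil => rfl
  | cons d t ih =>
    rw [pvFindKey]
    cases h : pvMkw k d
    · rw [if_neg (by simpa [pvMkw] using h), List.find?_cons_of_neg (by simp [h]), ih]
    · rw [if_pos (by simpa [pvMkw] using h), List.find?_cons_of_pos (by simp [h])]

theorem pvRk_le_length (ks : List String) (d : String) : pvRk ks d ≤ ks.length := by
  induction ks with
  | nil => simp [pvRk]
  | cons k ks ih =>
    simp only [pvRk, List.length_cons]
    split_ifs
    · omega
    · omega

theorem pvBp_le_of_mem {ks : List String} {l : List String} {d : String} (h : d ∈ l) :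
    pvBp ks l ≤ pvRk ks d := by
  induction l with
  | nil => cases h
  | cons a t ih =>
    rcases List.mem_cons.1 h with rfl | h'
    · simp [pvBp]
    · have := ih h'
      simp [pvBp] at this ⊢
      omega

theorem pvBp_shift {k : String} {ks : List String} {l : List String}
    (h : ∀ a ∈ l, pvMkw k a = false) :
    pvBp (k :: ks) l = pvBp ks l + 1 := by
  induction l with
  | nil => simp [pvBp]
  | cons a t ih =>
    have ha : pvMkw k a = false := h a (by simp)
    have ht := ih (fun x hx => h x (by simp [hx]))
    simp [pvBp, pvRk, ha] at ht ⊢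
    omega

theorem pvFind?_congr_mem {α : Type} {p q : α → Bool} :
    ∀ (l : List α), (∀ a ∈ l, p a = q a) → l.find? p = l.find? q := by
  intro l h
  induction l with
  | nil => rfl
  | cons a t ih =>
    have ha := h a (by simp)
    simp [List.find?, ha]
    split <;> simp_all

-- A's keyword-major scan equals the find? of the minimal-rank element
theorem pvScanKeys_eq (ks : List String) (l : List String) :
    pvScanKeys l ks =
      if pvBp ks l < ks.length then l.find? (fun d => pvRk ks d == pvBp ks l) else none := by
  induction ks with
  | nil => simp [pvScanKeys]
  | cons k ks ih =>
    rw [pvScanKeys, pvFindKey_eq]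
    rcases hf : List.find? (fun d => pvMkw k d) l with _ | d₀
    · -- no element matches keyword k
      have hnone : ∀ a ∈ l, pvMkw k a = false := by
        intro a ha
        simpa using List.find?_eq_none.1 hf a ha
      have hshift := pvBp_shift (ks := ks) hnone
      show pvScanKeys l ks = _
      rw [ih, hshift, List.length_cons]
      by_cases hb : pvBp ks l < ks.length
      · rw [if_pos hb, if_pos (by omega)]
        apply pvFind?_congr_mem
        intro a ha
        have hra : pvRk (k :: ks) a = pvRk ks a + 1 := by
          simp [pvRk, hnone a ha]
        rw [Bool.eq_iff_iff]
        simp only [hra, beq_iff_eq]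
        omega
      · rw [if_neg hb, if_neg (by omega)]
    · -- d₀ is the first element matching keyword k
      have hmem : d₀ ∈ l := List.mem_of_find?_eq_some hf
      have hmk : pvMkw k d₀ = true := List.find?_some hf
      have hrk0 : pvRk (k :: ks) d₀ = 0 := by simp [pvRk, hmk]
      have hbp0 : pvBp (k :: ks) l = 0 := by
        have := pvBp_le_of_mem (ks := k :: ks) hmem
        omega
      have hpred : (fun d => pvRk (k :: ks) d == (0 : Nat)) = fun d => pvMkw k d := by
        funext d
        by_cases hd : pvMkw k d = true <;> simp [pvRk, hd]
      rw [hbp0, if_pos (by simp), hpred, hf]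

-- B's per-element rank computation equals pvRk on the fixed keyword list
theorem pvRankOf_eq (d : String) (hd : d ≠ "") :
    ∀ (ks : List String) (i : Nat),
      pvRankOf (PySem.Str.lower d) ks i =
        if pvRk ks d < ks.length then some (i + pvRk ks d) else none := by
  intro ks
  induction ks with
  | nil => intro i; simp [pvRankOf, pvRk]
  | cons k ks ih =>
    intro i
    rw [pvRankOf]
    cases hx : PySem.Str.isIn k (PySem.Str.lower d)
    · have hm : pvMkw k d = false := by
        rw [pvMkw, hx, Bool.and_false]
      have hr : pvRk (k :: ks) d = pvRk ks d + 1 := by simp [pvRk, hm]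
      rw [if_neg (by simp), ih (i + 1), hr, List.length_cons]
      split_ifs with h1 h2 h2
      · exact congrArg some (by omega)
      · omega
      · omega
      · rfl
    · have hm : pvMkw k d = true := by
        rw [pvMkw, hx]
        simp [hd]
      have hr : pvRk (k :: ks) d = 0 := by simp [pvRk, hm]
      rw [if_pos rfl, hr, if_pos (by simp)]
      exact congrArg some (by omega)

theorem pvBStep_eq (s : Nat × Option String) (d : String) (hs : s.1 ≤ 5) :
    pvBStep s d =
      if pvRk ["oral", "spotlight", "poster", "accept", "reject"] d < s.1
      then (pvRk ["oral", "spotlight", "poster", "accept", "reject"] d, some d)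
      else s := by
  by_cases hd : d = ""
  · subst hd
    have h5 : pvRk ["oral", "spotlight", "poster", "accept", "reject"] "" = 5 := by decide
    rw [h5, if_neg (by omega)]
    simp [pvBStep]
  · rw [pvBStep, if_neg hd, pvRankOf_eq d hd,
      show (["oral", "spotlight", "poster", "accept", "reject"] : List String).length = 5 from rfl]
    by_cases h1 : pvRk ["oral", "spotlight", "poster", "accept", "reject"] d < 5
    · rw [if_pos h1]
      simp only [Nat.zero_add]
    · rw [if_neg h1, if_neg (by omega)]

-- B's fold computes (best rank, first best-rank element) when something matched
theorem pvFoldl_bstep (l : List String) :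
    ∀ (s : Nat × Option String), s.1 ≤ 5 →
      l.foldl pvBStep s =
        if pvBp ["oral", "spotlight", "poster", "accept", "reject"] l < s.1
        then (pvBp ["oral", "spotlight", "poster", "accept", "reject"] l,
              l.find? (fun d => pvRk ["oral", "spotlight", "poster", "accept", "reject"] d
                == pvBp ["oral", "spotlight", "poster", "accept", "reject"] l))
        else s := by
  induction l with
  | nil =>
    intro s hs
    have : pvBp ["oral", "spotlight", "poster", "accept", "reject"] [] = 5 := rfl
    rw [this, if_neg (by omega)]
    rfl
  | cons d t ih =>
    intro s hs
    have hple : pvRk ["oral", "spotlight", "poster", "accept", "reject"] d ≤ 5 := by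
      simpa using pvRk_le_length ["oral", "spotlight", "poster", "accept", "reject"] d
    set p := pvRk ["oral", "spotlight", "poster", "accept", "reject"] d with hp
    set q := pvBp ["oral", "spotlight", "poster", "accept", "reject"] t with hq
    have hbp : pvBp ["oral", "spotlight", "poster", "accept", "reject"] (d :: t) = min p q := rfl
    rw [List.foldl_cons, pvBStep_eq s d hs, hbp]
    by_cases h1 : p < s.1
    · rw [if_pos h1, ih (p, some d) (by simpa using hple)]
      simp only
      by_cases h2 : q < p
      · have hmin : min p q = q := by omega
        rw [hmin, if_pos h2, if_pos (by omega),
          List.find?_cons_of_neg (by simp only [beq_iff_eq]; omega)]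
      · have hmin : min p q = p := by omega
        rw [hmin, if_neg h2, if_pos h1,
          List.find?_cons_of_pos (by simp only [beq_iff_eq]; omega)]
    · rw [if_neg h1, ih s hs]
      by_cases h2 : q < s.1
      · have hmin : min p q = q := by omega
        rw [hmin, if_pos h2, if_pos h2,
          List.find?_cons_of_neg (by simp only [beq_iff_eq]; omega)]
      · rw [if_neg h2, if_neg (by omega)]

-- ===== VERDICT (by name: the statement is the Claim_ definition above) =====
theorem choose_best_decision_spec : Claim_equal_choose_best_decision := by
  intro l _
  unfold Spec_choose_best_decision choose_best_decision choose_best_decision_alt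
  by_cases hl : l = []
  · simp [hl]
  · rw [if_neg hl, if_neg hl, pvScanKeys_eq, pvFoldl_bstep l (5, none) (by simp)]
    by_cases h : pvBp ["oral", "spotlight", "poster", "accept", "reject"] l < 5
    · rw [if_pos (by simpa using h), if_pos (by simpa using h)]
    · rw [if_neg (by simpa using h), if_neg (by simpa using h)]
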